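-- pv_equiv track=rewrite | github.com/alexandraback/datacollection | solutions_5644738749267968_0/Python/pshields/d.py | wp
-- ===== SOURCE A (Python) =====
-- def wp(n, k):
--     n = sorted(n)
--     k = sorted(k)
--     score = 0
--     for v in n:
--         k_choice = next((x for x in k if x > v), k[0])
--         k.remove(k_choice)
--         if v > k_choice:
--             score += 1
--     return score
-- ===== SOURCE B (Python) =====
-- def wp(n, k):
--     ns = sorted(n)
--     ks = sorted(k)
--     # Phase 1: while the defender can still block (has a card > v), it spends
--     # the smallest such card; a single forward pointer over ks finds it, and
--     # the skipped (<= v) cards accumulate, in order, as the leftover pile.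
--     leftovers = []
--     j = 0
--     i = 0
--     while i < len(ns):
--         v = ns[i]
--         while j < len(ks) and ks[j] <= v:
--             leftovers.append(ks[j])
--             j += 1
--         if j >= len(ks):
--             break
--         j += 1  # blocked: round lost for n, no score
--         i += 1
--     # Phase 2: no blocking card remains; each remaining v is paired with the
--     # smallest remaining defender card, scoring on a strict win.
--     return sum(1 for v, c in zip(ns[i:], leftovers) if v > c)
-- ===== Notes on version B (the rewrite author's own statement) =====
-- stated objective: faster
-- what changed: Replaces the per-round linear scan and list.remove over the mutable defender hand with a single forward pointer over the sorted defender list (the game splits into a blocking phase and a fallback phase), then one zip to count wins.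
import Mathlib
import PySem

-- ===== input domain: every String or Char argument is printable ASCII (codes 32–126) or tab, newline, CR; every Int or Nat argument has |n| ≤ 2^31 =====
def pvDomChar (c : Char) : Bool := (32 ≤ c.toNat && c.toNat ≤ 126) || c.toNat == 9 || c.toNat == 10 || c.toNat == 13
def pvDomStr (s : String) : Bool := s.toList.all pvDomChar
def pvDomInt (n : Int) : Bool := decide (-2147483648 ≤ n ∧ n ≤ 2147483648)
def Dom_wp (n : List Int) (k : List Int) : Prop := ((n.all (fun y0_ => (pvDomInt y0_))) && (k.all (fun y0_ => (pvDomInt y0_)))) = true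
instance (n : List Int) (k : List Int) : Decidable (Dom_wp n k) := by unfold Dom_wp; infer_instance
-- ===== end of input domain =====

-- B replaces A's per-round linear scan + list.remove with a one-pass two-phase
-- pointer over the sorted defender list (objective: faster, O(n log n) vs O(n^2)).

-- ===== PORT A =====
-- loop body of A: k_choice = next((x for x in k if x > v), k[0]); k.remove(k_choice); score update.
-- Python raises IndexError at k[0] when k is empty; that input is outside Pre_wp and
-- the port returns the score accumulated so far there.
def wpGo (vs : List Int) (ks : List Int) (score : Int) : Int :=
  match vs with
  | [] => score
  | v :: rest =>
    match ks with
    | [] => score  -- Python: IndexError (excluded by Pre_wp)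
    | k0 :: _ =>
      let kc := (ks.find? (fun x => decide (v < x))).getD k0
      let ks' := (PySem.List.remove? ks kc).getD ks
      wpGo rest ks' (if kc < v then score + 1 else score)

def wp (n : List Int) (k : List Int) : Int :=
  wpGo (PySem.List.sorted n (fun x => x) false) (PySem.List.sorted k (fun x => x) false) 0

-- ===== PORT B =====
-- inner while of Source B: skip defender cards <= v into the leftover pile
def skipLe (v : Int) (ks : List Int) (acc : List Int) : List Int × List Int :=
  match ks with
  | [] => (acc, [])
  | x :: rest => if x ≤ v then skipLe v rest (acc ++ [x]) else (acc, x :: rest)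

-- outer while of Source B; returns (leftovers, remaining attacker cards)
def phase1 (vs : List Int) (ks : List Int) (acc : List Int) : List Int × List Int :=
  match vs with
  | [] => (acc, [])
  | v :: rest =>
    let p := skipLe v ks acc
    match p.2 with
    | [] => (p.1, v :: rest)
    | _ :: ks'' => phase1 rest ks'' p.1

-- the final sum-over-zip of Source B
def countWins (vs : List Int) (cs : List Int) : Int :=
  match vs, cs with
  | v :: vs', c :: cs' => (if c < v then 1 else 0) + countWins vs' cs'
  | _, _ => 0

def wp_alt (n : List Int) (k : List Int) : Int :=
  let p := phase1 (PySem.List.sorted n (fun x => x) false) (PySem.List.sorted k (fun x => x) false) []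
  countWins p.2 p.1

-- ===== PRECONDITION & SPEC =====
-- Pre_wp excludes exactly the inputs on which A raises IndexError (k[0] on an emptied hand):
-- the attacker must not have more cards than the defender.
def Pre_wp (n : List Int) (k : List Int) : Prop := n.length ≤ k.length
instance (n : List Int) (k : List Int) : Decidable (Pre_wp n k) := by unfold Pre_wp; infer_instance
def pvWitness_wp : List Int × List Int := ([2, 1], [1, 3])

def Spec_wp (n : List Int) (k : List Int) (out : Int) : Prop := out = wp_alt n k
instance (n : List Int) (k : List Int) (out : Int) : Decidable (Spec_wp n k out) := by unfold Spec_wp; infer_instance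

-- ===== CLAIM (what is proved, stated in full; the proofs are below) =====
def Claim_equal_wp : Prop := ∀ (n : List Int) (k : List Int), Dom_wp n k → Pre_wp n k → Spec_wp n k (wp n k)

-- ===== LEMMAS AND PROOFS =====

-- skipLe computes takeWhile/dropWhile
theorem skipLe_eq (v : Int) (ks acc : List Int) :
    skipLe v ks acc = (acc ++ ks.takeWhile (fun x => decide (x ≤ v)), ks.dropWhile (fun x => decide (x ≤ v))) := by
  induction ks generalizing acc with
  | nil => simp [skipLe]
  | cons x rest ih =>
    by_cases h : x ≤ v
    · simp [skipLe, h, ih]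
    · simp [skipLe, h]

-- fallback phase: when every remaining defender card is ≤ every remaining attacker card,
-- A pairs attacker cards with the leftover pile head-by-head.
theorem wpGo_fallback (vs lo : List Int) (score : Int)
    (h : ∀ a ∈ lo, ∀ u ∈ vs, a ≤ u) :
    wpGo vs lo score = score + countWins vs lo := by
  induction vs generalizing lo score with
  | nil => simp [wpGo, countWins]
  | cons v rest ih =>
    match lo with
    | [] => simp [wpGo, countWins]
    | a :: lo' =>
      have hfind : (a :: lo').find? (fun x => decide (v < x)) = none := by
        apply List.find?_eq_none.mpr
        intro x hx
        simp only [decide_eq_true_eq, not_lt] at *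
        simpa using h x hx v (by simp)
      have hrec := ih lo' (if a < v then score + 1 else score)
        (fun b hb u hu => h b (by simp [hb]) u (by simp [hu]))
      simp only [wpGo, hfind, Option.getD_none, PySem.List.remove?_cons_self, Option.getD_some,
        countWins, hrec]
      split_ifs <;> ring

-- main invariant: A on the remaining hand (leftovers ++ untouched suffix) equals
-- B's phase1 followed by countWins, for sorted inputs.
theorem wpGo_eq_phase1 (vs : List Int) :
    ∀ (ks acc : List Int) (score : Int),
    vs.Pairwise (· ≤ ·) → (acc ++ ks).Pairwise (· ≤ ·) →
    (∀ a ∈ acc, ∀ u ∈ vs, a ≤ u) →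
    wpGo vs (acc ++ ks) score =
      score + (let p := phase1 vs ks acc; countWins p.2 p.1) := by
  induction vs with
  | nil => intro ks acc score _ _ _; simp [wpGo, phase1, countWins]
  | cons v rest ih =>
    intro ks acc score hvs hsorted hacc
    have haccv : ∀ a ∈ acc, a ≤ v := fun a ha => hacc a ha v (by simp)
    have hvrest : ∀ u ∈ rest, v ≤ u := fun u hu => (List.pairwise_cons.mp hvs).1 u hu
    have hrest : rest.Pairwise (· ≤ ·) := (List.pairwise_cons.mp hvs).2
    have htwle : ∀ x ∈ ks.takeWhile (fun x => decide (x ≤ v)), x ≤ v := by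
      intro x hx
      have := List.mem_takeWhile_imp hx
      simpa using this
    match hdwe : ks.dropWhile (fun x => decide (x ≤ v)) with
    | [] =>
      -- no blocking card: full fallback
      have htweq : ks.takeWhile (fun x => decide (x ≤ v)) = ks := by
        conv_rhs => rw [← List.takeWhile_append_dropWhile (p := fun x => decide (x ≤ v)) (l := ks)]
        rw [hdwe, List.append_nil]
      have hksle : ∀ x ∈ ks, x ≤ v := by
        intro x hx
        exact htwle x (by rw [htweq]; exact hx)
      have hall : ∀ a ∈ acc ++ ks, ∀ u ∈ v :: rest, a ≤ u := by
        intro a ha u hu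
        have hav : a ≤ v := by
          rcases List.mem_append.mp ha with h1 | h2
          · exact haccv a h1
          · exact hksle a h2
        rcases List.mem_cons.mp hu with rfl | hu'
        · exact hav
        · exact le_trans hav (hvrest u hu')
      rw [wpGo_fallback _ _ _ hall]
      simp [phase1, skipLe_eq, hdwe, htweq]
    | b :: ks'' =>
      have hks : ks = ks.takeWhile (fun x => decide (x ≤ v)) ++ b :: ks'' := by
        conv_lhs => rw [← List.takeWhile_append_dropWhile (p := fun x => decide (x ≤ v)) (l := ks)]
        rw [hdwe]
      set tw := ks.takeWhile (fun x => decide (x ≤ v)) with htw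
      -- b is the smallest remaining card > v: A blocks with it
      have hvb : v < b := by
        have := List.head?_dropWhile_not (fun x => decide (x ≤ v)) ks
        rw [hdwe] at this
        simp at this
        exact this
      have hfind : (acc ++ ks).find? (fun x => decide (v < x)) = some b := by
        rw [hks, ← List.append_assoc, List.find?_append]
        have h1 : (acc ++ tw).find? (fun x => decide (v < x)) = none := by
          apply List.find?_eq_none.mpr
          intro x hx
          rcases List.mem_append.mp hx with h1 | h2
          · simp [not_lt.mpr (haccv x h1)]
          · simp [not_lt.mpr (htwle x h2)]
        rw [h1]
        simp [hvb]
      have hbnotin : b ∉ acc ++ tw := by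
        intro hb
        rcases List.mem_append.mp hb with h1 | h2
        · exact absurd (haccv b h1) (not_le.mpr hvb)
        · exact absurd (htwle b h2) (not_le.mpr hvb)
      have hremove : PySem.List.remove? (acc ++ ks) b = some ((acc ++ tw) ++ ks'') := by
        have hmem : b ∈ acc ++ ks := by rw [hks]; simp
        rw [PySem.List.remove?_eq_some_erase _ _ hmem]
        congr 1
        rw [hks, ← List.append_assoc, List.erase_append_right _ hbnotin]
        simp [List.erase_cons_head]
      have hne : acc ++ ks ≠ [] := by rw [hks]; simp
      obtain ⟨k0, kt, hk0⟩ := List.exists_cons_of_ne_nil hne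
      have hsub : List.Sublist ((acc ++ tw) ++ ks'') (acc ++ ks) := by
        rw [hks, ← List.append_assoc]
        exact (List.append_sublist_append_left _).mpr (List.sublist_cons_self b ks'')
      have hsorted' : ((acc ++ tw) ++ ks'').Pairwise (· ≤ ·) :=
        List.Pairwise.sublist hsub hsorted
      have hacc' : ∀ a ∈ acc ++ tw, ∀ u ∈ rest, a ≤ u := by
        intro a ha u hu
        have hav : a ≤ v := by
          rcases List.mem_append.mp ha with h1 | h2
          · exact haccv a h1
          · exact htwle a h2
        exact le_trans hav (hvrest u hu)
      have hrec := ih ks'' (acc ++ tw) score hrest hsorted' hacc'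
      rw [show wpGo (v :: rest) (acc ++ ks) score =
            wpGo rest ((acc ++ tw) ++ ks'') score by
        conv_lhs => rw [hk0]
        simp only [wpGo]
        rw [← hk0, hfind]
        simp only [Option.getD_some]
        rw [hremove]
        simp only [Option.getD_some]
        rw [if_neg (by omega)]]
      rw [hrec]
      simp [phase1, skipLe_eq, hdwe, ← htw]

theorem sorted_pairwise_id (xs : List Int) :
    (PySem.List.sorted xs (fun x => x) false).Pairwise (· ≤ ·) := by
  have := PySem.List.sorted_pairwise xs (fun x => x)
  simpa using this

-- ===== VERDICT (by name: the statement is the Claim_ definition above) =====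
theorem wp_spec : Claim_equal_wp := by
  intro n k _ _
  unfold Spec_wp wp wp_alt
  have h := wpGo_eq_phase1 (PySem.List.sorted n (fun x => x) false)
    (PySem.List.sorted k (fun x => x) false) [] 0
    (sorted_pairwise_id n) (by simpa using sorted_pairwise_id k) (by simp)
  simpa using h
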